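-- pv_equiv track=rewrite | github.com/Hugopeck/archeia-track-archive | tools/track_build.py | globs_overlap
-- ===== SOURCE A (Python) =====
-- def glob_base(glob: str) -> str:
--     return glob.rstrip("*").rstrip("/")
--
-- def globs_overlap(globs_a: list[str], globs_b: list[str]) -> bool:
--     if not globs_a or not globs_b:
--         return False
--     for left in globs_a:
--         for right in globs_b:
--             left_base = glob_base(left)
--             right_base = glob_base(right)
--             if not left_base or not right_base:
--                 return True
--             if left_base.startswith(right_base) or right_base.startswith(left_base):
--                 return True
--     return False
-- ===== SOURCE B (Python) =====
-- def glob_base(glob: str) -> str: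
--     return glob.rstrip("*").rstrip("/")
--
-- def globs_overlap(globs_a: list[str], globs_b: list[str]) -> bool:
--     if not globs_a or not globs_b:
--         return False
--     bases_b = {glob_base(r) for r in globs_b}
--     prefixes_b = {rb[:i] for rb in bases_b for i in range(len(rb) + 1)}
--     for left in globs_a:
--         lb = glob_base(left)
--         if lb in prefixes_b:
--             return True
--         if any(lb[:i] in bases_b for i in range(len(lb) + 1)):
--             return True
--     return False
-- ===== Notes on version B (the rewrite author's own statement) =====
-- stated objective: alternative
-- what changed: Replaces A's all-pairs startswith scan with one set of right-side bases plus a set of all their prefixes, so each left glob is answered by set lookups instead of scanning globs_b; it trades A's early exit on the first overlapping pair for index building, so it is not measurably faster on typical inputs.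
import Mathlib
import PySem

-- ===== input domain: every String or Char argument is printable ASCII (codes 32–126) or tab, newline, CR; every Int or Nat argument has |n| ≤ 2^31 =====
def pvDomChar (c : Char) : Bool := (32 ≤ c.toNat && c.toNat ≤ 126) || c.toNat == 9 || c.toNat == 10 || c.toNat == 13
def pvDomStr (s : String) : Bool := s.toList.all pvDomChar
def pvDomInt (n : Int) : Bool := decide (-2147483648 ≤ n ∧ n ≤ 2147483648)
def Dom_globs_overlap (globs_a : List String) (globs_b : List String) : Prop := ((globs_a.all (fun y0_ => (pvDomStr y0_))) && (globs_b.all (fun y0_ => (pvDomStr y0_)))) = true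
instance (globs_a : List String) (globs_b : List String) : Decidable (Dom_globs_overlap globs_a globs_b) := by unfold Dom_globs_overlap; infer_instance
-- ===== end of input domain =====

-- B replaces A's pairwise scan (every left glob against every right glob) by a set of the
-- right-side bases plus a set of all their prefixes, so each left glob is tested by set
-- membership instead of scanning globs_b (objective: alternative).

-- s.rstrip(c) for a single strip character c: drop matching chars from the right (exact)
def pyRstripChar (s : String) (c : Char) : String :=
  String.ofList ((s.toList.reverse.dropWhile (· == c)).reverse)

-- glob.rstrip("*").rstrip("/")  (shared helper: both Pythons define the same glob_base)
def glob_base (glob : String) : String :=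
  pyRstripChar (pyRstripChar glob '*') '/'

-- ===== PORT A =====
def globs_overlap (globs_a : List String) (globs_b : List String) : Bool :=
  if globs_a.isEmpty || globs_b.isEmpty then false
  else
    globs_a.any (fun left =>
      globs_b.any (fun right =>
        let left_base := glob_base left
        let right_base := glob_base right
        if left_base.isEmpty || right_base.isEmpty then true
        else PySem.Str.startswith left_base right_base || PySem.Str.startswith right_base left_base))

-- ===== PORT B =====
-- {s[:i] for i in range(len(s) + 1)} as the list of all prefixes
def pvPrefixes (s : String) : List String :=
  (List.range (s.length + 1)).map (fun i => String.ofList (s.toList.take i))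

def globs_overlap_alt (globs_a : List String) (globs_b : List String) : Bool :=
  if globs_a.isEmpty || globs_b.isEmpty then false
  else
    let bases_b : PySem.Set String := PySem.Set.ofList (globs_b.map glob_base)
    let prefixes_b : PySem.Set String := PySem.Set.ofList (bases_b.flatMap pvPrefixes)
    globs_a.any (fun left =>
      let lb := glob_base left
      PySem.Set.contains prefixes_b lb ||
        (pvPrefixes lb).any (fun p => PySem.Set.contains bases_b p))

-- ===== PRECONDITION & SPEC =====
def Spec_globs_overlap (globs_a : List String) (globs_b : List String) (out : Bool) : Prop := out = globs_overlap_alt globs_a globs_b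
instance (globs_a : List String) (globs_b : List String) (out : Bool) : Decidable (Spec_globs_overlap globs_a globs_b out) := by unfold Spec_globs_overlap; infer_instance

-- ===== CLAIM (what is proved, stated in full; the proofs are below) =====
def Claim_equal_globs_overlap : Prop := ∀ (globs_a : List String) (globs_b : List String), Dom_globs_overlap globs_a globs_b → Spec_globs_overlap globs_a globs_b (globs_overlap globs_a globs_b)

-- ===== LEMMAS AND PROOFS =====

-- A's per-pair test ↔ one base is a prefix of the other (the empty-base branch is the "" prefix case)
theorem pair_iff (lb rb : String) :
    ((if lb.isEmpty || rb.isEmpty then true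
     else PySem.Str.startswith lb rb || PySem.Str.startswith rb lb) = true)
      ↔ (rb.toList <+: lb.toList ∨ lb.toList <+: rb.toList) := by
  by_cases h : lb.isEmpty || rb.isEmpty
  · simp only [h, if_true, true_iff]
    rcases Bool.or_eq_true_iff.mp h with h1 | h1
    · have : lb.toList = [] := by simpa [String.isEmpty_iff] using h1
      simp [this]
    · have : rb.toList = [] := by simpa [String.isEmpty_iff] using h1
      simp [this]
  · simp only [Bool.not_eq_true] at h
    simp only [h, Bool.false_eq_true, if_false]
    simp [PySem.Chars.startswith_iff, Or.comm]

-- A returns true ↔ some pair of bases is in the prefix relation (either direction)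
theorem A_iff (globs_a globs_b : List String) :
    globs_overlap globs_a globs_b = true ↔
      ∃ l ∈ globs_a, ∃ r ∈ globs_b,
        ((glob_base r).toList <+: (glob_base l).toList ∨ (glob_base l).toList <+: (glob_base r).toList) := by
  unfold globs_overlap
  by_cases h : globs_a.isEmpty || globs_b.isEmpty
  · rcases Bool.or_eq_true_iff.mp h with h1 | h1 <;>
      simp_all [List.isEmpty_iff]
  · simp only [h, Bool.false_eq_true, if_false, List.any_eq_true]
    exact exists_congr fun l => and_congr_right fun _ =>
      exists_congr fun r => and_congr_right fun _ => pair_iff _ _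

theorem mem_pvPrefixes (p s : String) : p ∈ pvPrefixes s ↔ p.toList <+: s.toList := by
  simp only [pvPrefixes, List.mem_map, List.mem_range]
  constructor
  · rintro ⟨i, hi, rfl⟩
    simpa using List.take_prefix i s.toList
  · intro h
    refine ⟨p.toList.length, ?_, ?_⟩
    · have := h.length_le; simp at this ⊢; omega
    · rw [← List.prefix_iff_eq_take.mp h]; simp

theorem contains_ofList (xs : List String) (x : String) :
    PySem.Set.contains (PySem.Set.ofList xs) x = true ↔ x ∈ xs := by
  simp [PySem.Set.contains, PySem.Set.mem_ofList]

-- B returns true ↔ the same prefix relation holds for some pair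
theorem B_iff (globs_a globs_b : List String) :
    globs_overlap_alt globs_a globs_b = true ↔
      ∃ l ∈ globs_a, ∃ r ∈ globs_b,
        ((glob_base r).toList <+: (glob_base l).toList ∨ (glob_base l).toList <+: (glob_base r).toList) := by
  unfold globs_overlap_alt
  by_cases h : globs_a.isEmpty || globs_b.isEmpty
  · rcases Bool.or_eq_true_iff.mp h with h1 | h1 <;>
      simp_all [List.isEmpty_iff]
  · simp only [h, Bool.false_eq_true, if_false, List.any_eq_true, Bool.or_eq_true,
      contains_ofList, List.mem_flatMap, List.mem_map, mem_pvPrefixes, PySem.Set.mem_ofList]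
    constructor
    · rintro ⟨l, hl, ⟨q, ⟨r, hr, rfl⟩, hpq⟩ | ⟨p, hp, r, hr, rfl⟩⟩
      · exact ⟨l, hl, r, hr, Or.inr hpq⟩
      · exact ⟨l, hl, r, hr, Or.inl hp⟩
    · rintro ⟨l, hl, r, hr, h1 | h1⟩
      · exact ⟨l, hl, Or.inr ⟨glob_base r, h1, r, hr, rfl⟩⟩
      · exact ⟨l, hl, Or.inl ⟨glob_base r, ⟨r, hr, rfl⟩, h1⟩⟩

-- ===== VERDICT (by name: the statement is the Claim_ definition above) =====
theorem globs_overlap_spec : Claim_equal_globs_overlap := by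
  intro globs_a globs_b _
  unfold Spec_globs_overlap
  rw [Bool.eq_iff_iff, A_iff, B_iff]
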